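-- pv_equiv track=rewrite | github.com/Bobcatsoap/jy-server | cell/PaiTypeUtil.py | isPengPengHu
-- ===== SOURCE A (Python) =====
-- def isPengPengHu(shou_pai, chi=[]):
--     """
--     碰碰胡：由4副刻子（或杠）、将牌组成的和牌
--     """
--     if chi is not None and len(chi) > 0:
--         return False
--     arr = toArray(shou_pai)
--     is_first = True
--     for i in arr:
--         if i == 2:
--             if is_first:
--                 is_first = False
--                 continue
--             else:
--                 return False
--         if i != 3:
--             return False
--     return True
--
-- def toArray(shou_pai):
--     arr = [0] * 34
--     for i in shou_pai:
--         arr[i] += 1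
--     return arr
-- ===== SOURCE B (Python) =====
-- def isPengPengHu(shou_pai, chi=[]):
--     """
--     碰碰胡：由4副刻子（或杠）、将牌组成的和牌
--     """
--     if chi is not None and len(chi) > 0:
--         return False
--     s = sorted(toArray(shou_pai))
--     return s == [2] + [3] * 33 or s == [3] * 34
--
-- def toArray(shou_pai):
--     arr = [0] * 34
--     for i in shou_pai:
--         arr[i] += 1
--     return arr
-- ===== Notes on version B (the rewrite author's own statement) =====
-- stated objective: alternative
-- what changed: Replaces A's early-exit element-wise scan with an is_first flag by sorting the 34-bucket count array and comparing it for equality with the two accepted sorted profiles (a 2 followed by 33 threes, or 34 threes).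
import Mathlib
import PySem

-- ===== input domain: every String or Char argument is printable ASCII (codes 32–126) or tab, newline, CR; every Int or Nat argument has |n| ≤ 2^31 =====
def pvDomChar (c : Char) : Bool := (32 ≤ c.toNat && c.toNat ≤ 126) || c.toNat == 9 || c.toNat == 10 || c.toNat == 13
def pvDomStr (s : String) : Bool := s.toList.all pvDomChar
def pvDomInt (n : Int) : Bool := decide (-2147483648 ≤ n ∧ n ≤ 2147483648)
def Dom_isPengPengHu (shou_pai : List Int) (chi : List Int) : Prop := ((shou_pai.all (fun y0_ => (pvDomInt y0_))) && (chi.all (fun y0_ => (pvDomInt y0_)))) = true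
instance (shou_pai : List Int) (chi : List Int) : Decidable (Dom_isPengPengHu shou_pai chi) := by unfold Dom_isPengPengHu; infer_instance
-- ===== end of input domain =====

-- B replaces A's flag-tracking scan of the 34 count buckets by sorting the count
-- array and comparing it with the two accepted profiles [2]+[3]*33 and [3]*34.

-- ===== PORT A =====
-- toArray, identical helper in both Source A and Source B: arr[i] += 1 with Python index
-- semantics (negative wraps, out-of-range = IndexError = none).
def toArrayPy (shou_pai : List Int) : Option (List Int) :=
  shou_pai.foldl
    (fun acc i => acc.bind fun arr =>
      (PySem.List.pyGet? arr i).bind fun v => PySem.List.pySet? arr i (v + 1))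
    (some (List.replicate 34 0))

-- A's for-loop over arr with the is_first flag
def loopA : List Int → Bool → Bool
  | [], _ => true
  | i :: rest, isFirst =>
    if i == 2 then
      if isFirst then loopA rest false else false
    else if i != 3 then false
    else loopA rest isFirst

def isPengPengHu (shou_pai : List Int) (chi : List Int) : Bool :=
  if chi.length > 0 then false
  else
    match toArrayPy shou_pai with
    | none => false          -- IndexError in toArray; excluded by Pre_
    | some arr => loopA arr true

-- ===== PORT B =====
def isPengPengHu_alt (shou_pai : List Int) (chi : List Int) : Bool :=
  if chi.length > 0 then false
  else
    match toArrayPy shou_pai with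
    | none => false          -- IndexError in toArray; excluded by Pre_
    | some arr =>
      let s := PySem.List.sorted arr (fun x => x) false
      (s == 2 :: List.replicate 33 3) || (s == List.replicate 34 3)

-- ===== PRECONDITION & SPEC =====
-- Pre_ excludes exactly the inputs on which A raises IndexError: a tile index
-- outside Python's range for the 34-bucket array, reached only when chi is empty
-- (with nonempty chi, A returns False before indexing).
def Pre_isPengPengHu (shou_pai : List Int) (chi : List Int) : Prop :=
  chi = [] → ∀ i ∈ shou_pai, -34 ≤ i ∧ i < 34
instance (shou_pai : List Int) (chi : List Int) : Decidable (Pre_isPengPengHu shou_pai chi) := by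
  unfold Pre_isPengPengHu; infer_instance

def pvWitness_isPengPengHu : List Int × List Int := ([0, 0, 1, 1, 1], [])

def Spec_isPengPengHu (shou_pai : List Int) (chi : List Int) (out : Bool) : Prop := out = isPengPengHu_alt shou_pai chi
instance (shou_pai : List Int) (chi : List Int) (out : Bool) : Decidable (Spec_isPengPengHu shou_pai chi out) := by unfold Spec_isPengPengHu; infer_instance

-- ===== CLAIM (what is proved, stated in full; the proofs are below) =====
def Claim_equal_isPengPengHu : Prop := ∀ (shou_pai : List Int) (chi : List Int), Dom_isPengPengHu shou_pai chi → Pre_isPengPengHu shou_pai chi → Spec_isPengPengHu shou_pai chi (isPengPengHu shou_pai chi)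

-- ===== LEMMAS AND PROOFS =====

lemma count_three_le_length (a : Int) (ha2 : a ≠ 2) (ha3 : a ≠ 3) (l : List Int) :
    l.count a + l.count 2 + l.count 3 ≤ l.length := by
  induction l with
  | nil => simp
  | cons i t ih =>
    simp only [List.count_cons, List.length_cons]
    by_cases h2 : i = 2 <;> by_cases h3 : i = 3 <;> by_cases ha : i = a <;> simp_all <;> omega

lemma loopA_eq_counts (l : List Int) (b : Bool) :
    loopA l b =
      decide (l.count 2 ≤ (if b then 1 else 0) ∧ l.count 2 + l.count 3 = l.length) := by
  induction l generalizing b with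
  | nil => cases b <;> simp [loopA]
  | cons i t ih =>
    have hle := count_three_le_length
    by_cases h2 : i = 2
    · subst h2
      cases b with
      | false =>
        rw [show loopA ((2 : Int) :: t) false = false from by simp [loopA]]
        simp
      | true =>
        rw [show loopA ((2 : Int) :: t) true = loopA t false from by simp [loopA]]
        rw [ih false]
        exact decide_eq_decide.mpr (by simp; omega)
    · by_cases h3 : i = 3
      · subst h3
        rw [show loopA ((3 : Int) :: t) b = loopA t b from by simp [loopA]]
        rw [ih b]
        exact decide_eq_decide.mpr (by simp; omega)
      · rw [show loopA (i :: t) b = false from by simp [loopA, h2, h3]]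
        simp [h2, h3]
        have := count_three_le_length i h2 h3 t
        omega

lemma length_pySet? (xs : List Int) (i : Int) (v : Int) (ys : List Int)
    (h : PySem.List.pySet? xs i v = some ys) : ys.length = xs.length := by
  simp [PySem.List.pySet?, PySem.List.pyIdx?] at h
  split at h
  · obtain ⟨w, -, rfl⟩ := h
    simp
  · obtain ⟨w, -, rfl⟩ := h
    simp

lemma toArray_foldl_none (l : List Int) :
    l.foldl (fun acc i => acc.bind fun arr =>
      (PySem.List.pyGet? arr i).bind fun v => PySem.List.pySet? arr i (v + 1))
      (none : Option (List Int)) = none := by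
  induction l with
  | nil => rfl
  | cons i t ih => simpa using ih

lemma toArray_foldl_length : ∀ (l : List Int) (init arr : List Int),
    l.foldl (fun acc i => acc.bind fun arr =>
      (PySem.List.pyGet? arr i).bind fun v => PySem.List.pySet? arr i (v + 1)) (some init) = some arr →
    arr.length = init.length := by
  intro l
  induction l with
  | nil =>
    intro init arr h
    simp only [List.foldl] at h
    injection h with h
    rw [← h]
  | cons i t ih =>
    intro init arr h
    rw [List.foldl_cons] at h
    have hbeta : ((some init).bind fun a => (PySem.List.pyGet? a i).bind fun v => PySem.List.pySet? a i (v + 1))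
        = ((PySem.List.pyGet? init i).bind fun v => PySem.List.pySet? init i (v + 1)) := rfl
    rw [hbeta] at h
    cases hg : PySem.List.pyGet? init i with
    | none =>
      rw [hg, Option.bind_none, toArray_foldl_none t] at h
      exact absurd h (by simp)
    | some v =>
      rw [hg, Option.bind_some] at h
      cases hst : PySem.List.pySet? init i (v + 1) with
      | none =>
        rw [hst] at h
        rw [toArray_foldl_none t] at h
        exact absurd h (by simp)
      | some mid =>
        rw [hst] at h
        have h1 := ih mid arr h
        rw [h1, length_pySet? init i (v + 1) mid hst]

lemma toArrayPy_length (shou_pai arr : List Int) (h : toArrayPy shou_pai = some arr) :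
    arr.length = 34 := by
  have := toArray_foldl_length shou_pai (List.replicate 34 0) arr h
  simpa using this

lemma sorted_eq_counts (arr pat : List Int)
    (h : PySem.List.sorted arr (fun x => x) false = pat) :
    arr.count 2 = pat.count 2 ∧ arr.count 3 = pat.count 3 ∧ arr.length = pat.length := by
  have hp : pat.Perm arr := h ▸ PySem.List.sorted_perm arr (fun x => x) false
  exact ⟨hp.symm.count_eq 2, hp.symm.count_eq 3, hp.symm.length_eq⟩

-- a list whose 2s and 3s exhaust its length is a permutation of the literal pattern
lemma perm_of_counts (arr : List Int) (pat : List Int)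
    (hlen : arr.length = pat.length)
    (h2 : arr.count 2 = pat.count 2) (h3 : arr.count 3 = pat.count 3)
    (hfull : arr.count 2 + arr.count 3 = arr.length) :
    arr.Perm pat := by
  rw [List.perm_iff_count]
  intro a
  by_cases ha2 : a = 2
  · simpa [ha2] using h2
  · by_cases ha3 : a = 3
    · simpa [ha3] using h3
    · have h1 := count_three_le_length a ha2 ha3 arr
      have h1 := count_three_le_length a ha2 ha3 arr
      have hq := count_three_le_length a ha2 ha3 pat
      omega

-- ===== VERDICT (by name: the statement is the Claim_ definition above) =====
theorem isPengPengHu_spec : Claim_equal_isPengPengHu := by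
  intro shou_pai chi _ _
  unfold Spec_isPengPengHu isPengPengHu isPengPengHu_alt
  by_cases hc : chi.length > 0
  · simp [hc]
  · simp only [if_neg hc]
    cases htA : toArrayPy shou_pai with
    | none => rfl
    | some arr =>
      show loopA arr true =
        ((PySem.List.sorted arr (fun x => x) false == 2 :: List.replicate 33 3) ||
         (PySem.List.sorted arr (fun x => x) false == List.replicate 34 3))
      rw [loopA_eq_counts arr true]
      have hlen : arr.length = 34 := toArrayPy_length shou_pai arr htA
      by_cases hs2 : PySem.List.sorted arr (fun x => x) false = 2 :: List.replicate 33 3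
      · obtain ⟨c2, c3, -⟩ := sorted_eq_counts arr _ hs2
        simp only [List.count_cons, List.count_replicate] at c2 c3
        norm_num at c2 c3
        simp [hs2, c2, c3, hlen]
      · by_cases hs3 : PySem.List.sorted arr (fun x => x) false = List.replicate 34 3
        · obtain ⟨c2, c3, -⟩ := sorted_eq_counts arr _ hs3
          simp only [List.count_replicate] at c2 c3
          norm_num at c2 c3
          simp [hs3, c2, c3, hlen]
        · have hRHS : ((PySem.List.sorted arr (fun x => x) false == 2 :: List.replicate 33 3) ||
              (PySem.List.sorted arr (fun x => x) false == List.replicate 34 3)) = false := by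
            simp only [Bool.or_eq_false_iff, beq_eq_false_iff_ne, ne_eq]
            exact ⟨hs2, hs3⟩
          rw [hRHS, decide_eq_false_iff_not]
          rintro ⟨h21, hfull⟩
          simp only [reduceIte] at h21
          have hc2 : arr.count 2 = 0 ∨ arr.count 2 = 1 := by omega
          rcases hc2 with hc2 | hc2
          · -- count 2 = 0, count 3 = 34: arr ~ replicate 34 3, contradicts hs3
            have hc3 : arr.count 3 = 34 := by omega
            have hp : arr.Perm (List.replicate 34 3) := by
              apply perm_of_counts <;> simp_all
            exact hs3 (PySem.List.sorted_id_eq_of_perm_of_pairwise _ _ hp.symm (by decide))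
          · -- count 2 = 1, count 3 = 33: arr ~ 2 :: replicate 33 3, contradicts hs2
            have hc3 : arr.count 3 = 33 := by omega
            have hp : arr.Perm (2 :: List.replicate 33 3) := by
              apply perm_of_counts <;> simp_all
            exact hs2 (PySem.List.sorted_id_eq_of_perm_of_pairwise _ _ hp.symm (by decide))
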